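-- pv_equiv track=rewrite | github.com/ciankehoe/CA268-DSA | sequences_sets_maps/word_lengths.py | get_counts_dict
-- ===== SOURCE A (Python) =====
-- def get_counts_dict(lst):
--
--     d = {}
--
--     for word in lst:
--         if len(word) not in d:
--             d[len(word)] = 1
--         else:
--             d[len(word)] += 1
--     return d
-- ===== SOURCE B (Python) =====
-- # B: two-phase re-implementation — collect distinct lengths (first-seen order), then count each; same result as A's single accumulating pass.
-- def get_counts_dict(lst):
--     lengths = [len(w) for w in lst]
--     return {k: lengths.count(k) for k in dict.fromkeys(lengths)}
-- ===== Notes on version B (the rewrite author's own statement) =====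
-- stated objective: alternative
-- what changed: Replaces A's single accumulating dict pass (membership test + increment per word) by a two-phase scheme: map to lengths, take the distinct lengths in first-occurrence order, and build the dict by counting each distinct length with lengths.count.
import Mathlib
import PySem

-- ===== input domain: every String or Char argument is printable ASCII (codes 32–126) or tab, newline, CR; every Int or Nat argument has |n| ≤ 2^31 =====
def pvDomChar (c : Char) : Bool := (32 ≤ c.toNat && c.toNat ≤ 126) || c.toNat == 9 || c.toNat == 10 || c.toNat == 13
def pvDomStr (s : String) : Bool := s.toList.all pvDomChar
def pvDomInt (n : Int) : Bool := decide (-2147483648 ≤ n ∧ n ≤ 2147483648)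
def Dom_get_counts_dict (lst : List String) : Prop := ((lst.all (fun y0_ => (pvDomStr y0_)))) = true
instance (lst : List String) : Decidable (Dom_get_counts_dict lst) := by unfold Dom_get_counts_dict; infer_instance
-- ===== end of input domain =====

-- B replaces A's single accumulating dict pass by dedup-then-count-per-distinct-length (alternative decomposition, same result).


-- ===== PORT A =====
def get_counts_dict (lst : List String) : List (Int × Int) :=
  (lst.foldl (fun d word =>
      let n : Int := PySem.Str.len word
      match PySem.Dict.get? d n with
      | none => PySem.Dict.insert d n (1 : Int)
      | some v => PySem.Dict.insert d n (v + 1)) PySem.Dict.empty).items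

-- ===== PORT B =====
def get_counts_dict_alt (lst : List String) : List (Int × Int) :=
  let lengths := lst.map (fun w => PySem.Str.len w)
  (PySem.List.dedup lengths).map (fun k => (k, (List.count k lengths : Int)))

-- ===== PRECONDITION & SPEC =====
def Spec_get_counts_dict (lst : List String) (out : List (Int × Int)) : Prop := out = get_counts_dict_alt lst
instance (lst : List String) (out : List (Int × Int)) : Decidable (Spec_get_counts_dict lst out) := by unfold Spec_get_counts_dict; infer_instance

-- ===== CLAIM (what is proved, stated in full; the proofs are below) =====
def Claim_equal_get_counts_dict : Prop := ∀ (lst : List String), Dom_get_counts_dict lst → Spec_get_counts_dict lst (get_counts_dict lst)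

-- ===== LEMMAS AND PROOFS =====

-- A's loop body (membership test, then set-to-1 or increment) is exactly Counter's modify step.
theorem get_counts_dict_step (d : PySem.Dict Int Int) (n : Int) :
    (match PySem.Dict.get? d n with
     | none => PySem.Dict.insert d n (1 : Int)
     | some v => PySem.Dict.insert d n (v + 1)) = PySem.Dict.modify d n 0 (· + 1) := by
  unfold PySem.Dict.modify PySem.Dict.getD
  cases PySem.Dict.get? d n <;> simp

theorem get_counts_dict_eq_counter (lst : List String) :
    get_counts_dict lst =
      (PySem.Dict.counter (lst.map (fun w => PySem.Str.len w))).items := by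
  unfold get_counts_dict
  rw [PySem.Dict.counter_eq_foldl, List.foldl_map]
  have h : (fun (d : PySem.Dict Int Int) (word : String) =>
      let n : Int := PySem.Str.len word
      match PySem.Dict.get? d n with
      | none => PySem.Dict.insert d n (1 : Int)
      | some v => PySem.Dict.insert d n (v + 1)) =
      (fun d w => PySem.Dict.modify d (PySem.Str.len w) 0 (· + 1)) :=
    funext fun d => funext fun w => get_counts_dict_step d (PySem.Str.len w)
  rw [h]

-- ===== VERDICT (by name: the statement is the Claim_ definition above) =====
theorem get_counts_dict_spec : Claim_equal_get_counts_dict := by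
  intro lst _
  show get_counts_dict lst = get_counts_dict_alt lst
  rw [get_counts_dict_eq_counter, PySem.Dict.items_counter]
  simp only [get_counts_dict_alt, PySem.List.dedup_eq_ofList]
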